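-- pv_equiv track=rewrite | github.com/Luolingwei/LeetCode | String/QGS_MaxCommon.py | maxCommon
-- ===== SOURCE A (Python) =====
-- import collections
--
-- def maxCommon(s):
--     c=collections.Counter(s)
--     common,ans=0,0
--     com_strs=set()
--     for i in range(len(s)-1):
--         if c[s[i]]>1:
--             c[s[i]]-=1
--             if s[i] not in com_strs:
--                 common+=1
--                 com_strs.add(s[i])
--         elif c[s[i]]==1:
--             if s[i] in com_strs:
--                 common-=1
--                 com_strs.remove(s[i])
--             c[s[i]]-=1
--         ans=max(ans,common)
--     return ans
-- ===== SOURCE B (Python) =====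
-- def maxCommon(s):
--     ans = 0
--     for i in range(len(s) - 1):
--         ans = max(ans, len(set(s[:i + 1]) & set(s[i + 1:])))
--     return ans
-- ===== Notes on version B (the rewrite author's own statement) =====
-- stated objective: simpler
-- what changed: Replaces A's stateful single pass (a mutable Counter of remaining occurrences plus an incrementally maintained set and running counter) by a direct three-line formulation: for each split point take the size of the intersection of the distinct characters of the prefix and the suffix, and return the maximum.
import Mathlib
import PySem

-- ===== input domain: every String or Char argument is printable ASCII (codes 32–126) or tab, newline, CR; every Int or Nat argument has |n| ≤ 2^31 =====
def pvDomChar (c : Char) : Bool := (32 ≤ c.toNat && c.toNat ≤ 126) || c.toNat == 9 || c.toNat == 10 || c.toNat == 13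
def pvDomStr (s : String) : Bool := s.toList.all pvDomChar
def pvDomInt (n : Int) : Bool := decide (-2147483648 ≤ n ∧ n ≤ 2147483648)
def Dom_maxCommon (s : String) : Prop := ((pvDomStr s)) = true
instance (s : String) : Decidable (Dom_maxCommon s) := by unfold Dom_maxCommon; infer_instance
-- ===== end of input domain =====

-- B re-states A as a direct maximum over split points (simpler, not faster); equivalence is proved for all strings.

-- ===== PORT A =====
-- 'for i in range(len(s)-1)' with a body reading only s[i]: transcribed as structural recursion
-- that processes the head while at least one character remains after it (exactly indices 0..n-2),
-- carrying the Counter c, common, ans and com_strs as the Python does; 'ans=max(ans,common)' is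
-- the shared tail of every iteration.  'com_strs.remove(s[i])' runs only under
-- 'if s[i] in com_strs', where set.remove = Set.discard.
def loopA : List Char → PySem.Dict Char Int → Int → Int → PySem.Set Char → Int
  | x :: r@(_ :: _), c, common, ans, cs =>
    let cnt := c.getD x 0
    let st :=
      if cnt > 1 then
        let c2 := c.insert x (cnt - 1)
        if PySem.Set.contains cs x then (c2, common, cs)
        else (c2, common + 1, PySem.Set.add cs x)
      else if cnt == 1 then
        if PySem.Set.contains cs x then
          (PySem.Dict.insert c x (cnt - 1), common - 1, PySem.Set.discard cs x)
        else (PySem.Dict.insert c x (cnt - 1), common, cs)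
      else (c, common, cs)
    loopA r st.1 st.2.1 (max ans st.2.1) st.2.2
  | _, _, _, ans, _ => ans

def maxCommon (s : String) : Int :=
  loopA s.toList (PySem.Dict.counter s.toList) 0 0 PySem.Set.empty

-- ===== PORT B =====
-- Source B: for i in range(len(s)-1): ans = max(ans, len(set(s[:i+1]) & set(s[i+1:])))
def maxCommon_alt (s : String) : Int :=
  let l := s.toList
  (PySem.List.pyRange 0 (PySem.List.len l - 1) 1).foldl
    (fun ans i =>
      max ans (PySem.Set.len
        (PySem.Set.inter (PySem.Set.ofList (PySem.List.slice l none (some (i + 1))))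
                         (PySem.Set.ofList (PySem.List.slice l (some (i + 1)) none))))) 0

-- ===== PRECONDITION & SPEC =====
def Spec_maxCommon (s : String) (out : Int) : Prop := out = maxCommon_alt s
instance (s : String) (out : Int) : Decidable (Spec_maxCommon s out) := by unfold Spec_maxCommon; infer_instance

-- ===== CLAIM (what is proved, stated in full; the proofs are below) =====
def Claim_equal_maxCommon : Prop := ∀ (s : String), Dom_maxCommon s → Spec_maxCommon s (maxCommon s)

-- ===== LEMMAS AND PROOFS =====

-- the per-split quantity B computes, written over an explicit prefix/suffix pair
def gB (pre r : List Char) : Int :=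
  PySem.Set.len (PySem.Set.inter (PySem.Set.ofList pre) (PySem.Set.ofList r))

-- reference recursion: both ports are reduced to this shape
def refB : List Char → List Char → Int → Int
  | x :: r@(_ :: _), pre, ans => refB r (pre ++ [x]) (max ans (gB (pre ++ [x]) r))
  | _, _, ans => ans

theorem nodup_len_eq {s t : List Char} (hs : s.Nodup) (ht : t.Nodup)
    (h : ∀ y, y ∈ s ↔ y ∈ t) : s.length = t.length :=
  ((List.perm_ext_iff_of_nodup hs ht).mpr h).length_eq

theorem gB_card (pre r : List Char) (cs : PySem.Set Char) (hn : List.Nodup cs)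
    (h : ∀ y, y ∈ cs ↔ (y ∈ pre ∧ y ∈ r)) : (cs.length : Int) = gB pre r := by
  unfold gB
  rw [PySem.Set.len_eq]
  congr 1
  exact nodup_len_eq hn (PySem.Set.nodup_inter _ _ (PySem.Set.nodup_ofList pre))
    (fun y => by rw [h y, PySem.Set.mem_inter, PySem.Set.mem_ofList, PySem.Set.mem_ofList])

theorem loopA_eq (rest : List Char) : ∀ (pre : List Char) (c : PySem.Dict Char Int)
    (common ans : Int) (cs : PySem.Set Char),
    (∀ x, c.getD x 0 = (rest.count x : Int)) →
    List.Nodup cs →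
    (∀ y, y ∈ cs ↔ (y ∈ pre ∧ y ∈ rest)) →
    common = (cs.length : Int) →
    loopA rest c common ans cs = refB rest pre ans := by
  induction rest with
  | nil => intro pre c common ans cs _ _ _ _; simp [loopA, refB]
  | cons x r ih =>
    cases r with
    | nil => intro pre c common ans cs _ _ _ _; simp [loopA, refB]
    | cons y t =>
      intro pre c common ans cs hcnt hnd hmem hlen
      have hx : c.getD x 0 = ((y :: t).count x : Int) + 1 := by
        rw [hcnt x]; rw [List.count_cons_self]; push_cast; ring
      by_cases hxr : x ∈ y :: t
      · -- another occurrence remains: the 'c[s[i]]>1' branch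
        have hgt : c.getD x 0 > 1 := by
          have : 1 ≤ (y :: t).count x := List.one_le_count_iff.mpr hxr
          omega
        have hcnt' : ∀ z, (c.insert x (c.getD x 0 - 1)).getD z 0 = ((y :: t).count z : Int) := by
          intro z
          rw [PySem.Dict.getD_insert]
          split_ifs with hz
          · subst hz; omega
          · rw [hcnt z]; simp [List.count_cons, Ne.symm hz]
        by_cases hxcs : x ∈ cs
        · have hmem' : ∀ z, z ∈ cs ↔ (z ∈ pre ++ [x] ∧ z ∈ y :: t) := by
            intro z
            by_cases hzx : z = x
            · subst hzx
              simp only [List.mem_append, List.mem_singleton, or_true, true_and]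
              exact ⟨fun _ => hxr, fun _ => hxcs⟩
            · rw [hmem z]
              simp [List.mem_append, hzx, List.mem_cons]
          have hg : common = gB (pre ++ [x]) (y :: t) := by
            rw [hlen]; exact gB_card _ _ cs hnd hmem'
          simp only [loopA, if_pos hgt, if_pos ((PySem.Set.contains_iff cs x).mpr hxcs)]
          rw [ih (pre ++ [x]) _ common (max ans common) cs hcnt' hnd hmem' hlen]
          simp [refB, hg]
        · have hmem' : ∀ z, z ∈ PySem.Set.add cs x ↔ (z ∈ pre ++ [x] ∧ z ∈ y :: t) := by
            intro z
            rw [PySem.Set.mem_add]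
            by_cases hzx : z = x
            · subst hzx; simp [hxr]
            · rw [hmem z]
              simp [List.mem_append, hzx, List.mem_cons]
          have hlen' : common + 1 = ((PySem.Set.add cs x).length : Int) := by
            rw [PySem.Set.add_of_not_mem hxcs, List.length_append, hlen]
            simp
          have hg : common + 1 = gB (pre ++ [x]) (y :: t) := by
            rw [hlen']
            exact gB_card _ _ _ (PySem.Set.nodup_add cs x hnd) hmem'
          have hcont : PySem.Set.contains cs x = false := by
            by_contra h
            exact hxcs ((PySem.Set.contains_iff cs x).mp (by revert h; cases PySem.Set.contains cs x <;> simp))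
          simp only [loopA, if_pos hgt, hcont, Bool.false_eq_true, if_false]
          rw [ih (pre ++ [x]) _ (common + 1) (max ans (common + 1)) _ hcnt'
              (PySem.Set.nodup_add cs x hnd) hmem' hlen']
          simp [refB, hg]
      · -- last occurrence: cnt == 1
        have h0 : (y :: t).count x = 0 := List.count_eq_zero.mpr hxr
        have heq : c.getD x 0 = 1 := by rw [hx, h0]; simp
        have hngt : ¬ c.getD x 0 > 1 := by omega
        have hbeq : (c.getD x 0 == 1) = true := by rw [heq]; rfl
        have hcnt' : ∀ z, (c.insert x (c.getD x 0 - 1)).getD z 0 = ((y :: t).count z : Int) := by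
          intro z
          rw [PySem.Dict.getD_insert]
          split_ifs with hz
          · subst hz; omega
          · rw [hcnt z]; simp [List.count_cons, Ne.symm hz]
        by_cases hxcs : x ∈ cs
        · have hmem' : ∀ z, z ∈ PySem.Set.discard cs x ↔ (z ∈ pre ++ [x] ∧ z ∈ y :: t) := by
            intro z
            rw [PySem.Set.mem_discard]
            by_cases hzx : z = x
            · subst hzx; simp [hxr]
            · rw [hmem z]
              simp [List.mem_append, hzx, List.mem_cons]
          have hlen' : common - 1 = ((PySem.Set.discard cs x).length : Int) := by
            have : cs.length = (PySem.Set.discard cs x).length + 1 := by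
              have hperm : ∀ z, z ∈ cs ↔ z ∈ x :: PySem.Set.discard cs x := by
                intro z
                rw [List.mem_cons, PySem.Set.mem_discard]
                by_cases hzx : z = x
                · subst hzx; simp [hxcs]
                · simp [hzx]
              have hnd2 : (x :: PySem.Set.discard cs x).Nodup := by
                refine List.nodup_cons.mpr ⟨?_, PySem.Set.nodup_discard cs x hnd⟩
                rw [PySem.Set.mem_discard]; simp
              have := nodup_len_eq hnd hnd2 hperm
              simpa using this
            rw [hlen, this]; push_cast; ring
          have hg : common - 1 = gB (pre ++ [x]) (y :: t) := by
            rw [hlen']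
            exact gB_card _ _ _ (PySem.Set.nodup_discard cs x hnd) hmem'
          simp only [loopA, if_neg hngt, hbeq, if_pos ((PySem.Set.contains_iff cs x).mpr hxcs),
            if_true]
          rw [ih (pre ++ [x]) _ (common - 1) (max ans (common - 1)) _ hcnt'
              (PySem.Set.nodup_discard cs x hnd) hmem' hlen']
          simp [refB, hg]
        · have hmem' : ∀ z, z ∈ cs ↔ (z ∈ pre ++ [x] ∧ z ∈ y :: t) := by
            intro z
            by_cases hzx : z = x
            · subst hzx; simp [hxr, hxcs]
            · rw [hmem z]
              simp [List.mem_append, hzx, List.mem_cons]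
          have hg : common = gB (pre ++ [x]) (y :: t) := by
            rw [hlen]; exact gB_card _ _ cs hnd hmem'
          have hcont : PySem.Set.contains cs x = false := by
            by_contra h
            exact hxcs ((PySem.Set.contains_iff cs x).mp (by revert h; cases PySem.Set.contains cs x <;> simp))
          simp only [loopA, if_neg hngt, hbeq, hcont, Bool.false_eq_true, if_false, if_true]
          rw [ih (pre ++ [x]) _ common (max ans common) cs hcnt' hnd hmem' hlen]
          simp [refB, hg]

theorem refB_eq (rest : List Char) : ∀ (pre : List Char) (ans : Int),
    refB rest pre ans =
    (PySem.List.pyRange (pre.length) ((pre.length : Int) + rest.length - 1) 1).foldl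
      (fun a i =>
        max a (PySem.Set.len
          (PySem.Set.inter
            (PySem.Set.ofList (PySem.List.slice (pre ++ rest) none (some (i + 1))))
            (PySem.Set.ofList (PySem.List.slice (pre ++ rest) (some (i + 1)) none))))) ans := by
  induction rest with
  | nil =>
    intro pre ans
    simp only [refB]
    rw [show PySem.List.pyRange (pre.length) ((pre.length : Int) + ([] : List Char).length - 1) 1 = [] by
      simp [PySem.List.pyRange]]
    simp
  | cons x r ih =>
    cases r with
    | nil =>
      intro pre ans
      simp only [refB]
      rw [show PySem.List.pyRange (pre.length) ((pre.length : Int) + ([x] : List Char).length - 1) 1 = [] by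
        simp [PySem.List.pyRange]]
      simp
    | cons y t =>
      intro pre ans
      have hb : (pre.length : Int) < (pre.length : Int) + (x :: y :: t).length - 1 := by
        simp [List.length_cons]; omega
      rw [PySem.List.pyRange_one_cons hb]
      simp only [List.foldl_cons]
      have htake : PySem.List.slice (pre ++ x :: y :: t) none (some ((pre.length : Int) + 1))
          = pre ++ [x] := by
        rw [show ((pre.length : Int) + 1) = ((pre.length + 1 : Nat) : Int) by push_cast; ring,
          PySem.List.slice_to_natCast]
        rw [List.take_append]
        simp
      have hdrop : PySem.List.slice (pre ++ x :: y :: t) (some ((pre.length : Int) + 1)) none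
          = y :: t := by
        rw [show ((pre.length : Int) + 1) = ((pre.length + 1 : Nat) : Int) by push_cast; ring,
          PySem.List.slice_from_natCast]
        rw [List.drop_append]
        simp
      simp only [refB, htake, hdrop]
      rw [ih (pre ++ [x]) (max ans (gB (pre ++ [x]) (y :: t)))]
      have hlist : (pre ++ [x]) ++ y :: t = pre ++ x :: y :: t := by
        simp
      rw [hlist]
      have hb3 : ((pre.length : Int) + 1 + ((y :: t) : List Char).length - 1)
          = ((pre.length : Int) + ((x :: y :: t) : List Char).length - 1) := by
        simp [List.length_cons]; ring
      have hb2 : ((pre ++ [x]).length : Int) = (pre.length : Int) + 1 := by simp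
      rw [hb2, hb3]
      simp [gB]

theorem maxCommon_eq_refB (s : String) : maxCommon s = refB s.toList [] 0 := by
  unfold maxCommon
  exact loopA_eq s.toList [] _ 0 0 PySem.Set.empty
    (fun x => PySem.Dict.getD_counter s.toList x)
    List.nodup_nil
    (fun y => by simp [PySem.Set.empty])
    (by simp [PySem.Set.empty])

theorem maxCommon_alt_eq_refB (s : String) : maxCommon_alt s = refB s.toList [] 0 := by
  unfold maxCommon_alt
  rw [refB_eq s.toList [] 0]
  simp [PySem.List.len_eq]

-- ===== VERDICT (by name: the statement is the Claim_ definition above) =====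
theorem maxCommon_spec : Claim_equal_maxCommon := by
  intro s _
  unfold Spec_maxCommon
  rw [maxCommon_eq_refB, maxCommon_alt_eq_refB]
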